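-- pv_equiv track=rewrite | github.com/Imaginative005/Rosalind | K_mer_compositions.py | count_4mers
-- ===== SOURCE A (Python) =====
-- from collections import defaultdict
--
-- def count_4mers(s):
--     k = 4  # Set the value of k to 4
--     kmer_counts = defaultdict(int)  # Use a dictionary to store counts
--
--     # Iterate through the DNA string and count 4-mers
--     for i in range(len(s) - k + 1):
--         kmer = s[i:i + k]  # Extract the 4-mer
--         kmer_counts[kmer] += 1  # Increment the count for this 4-mer
--
--     # Create a list of counts in lexicographic order
--     counts = [kmer_counts[kmer] for kmer in sorted(kmer_counts.keys())]
--
--     return counts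
-- ===== SOURCE B (Python) =====
-- def count_4mers(s):
--     # Sort all 4-mer slices, then count each maximal run of equal
--     # neighbours in one pass (sort-then-group instead of hash counting).
--     kmers = sorted(s[i:i + 4] for i in range(len(s) - 3))
--     counts = []
--     i, n = 0, len(kmers)
--     while i < n:
--         j = i + 1
--         while j < n and kmers[j] == kmers[i]:
--             j += 1
--         counts.append(j - i)
--         i = j
--     return counts
-- ===== Notes on version B (the rewrite author's own statement) =====
-- stated objective: alternative
-- what changed: Replaces the defaultdict hash-counting plus separate sort of the distinct keys with building the list of all 4-mer slices, sorting it once, and emitting the length of each maximal run of equal neighbours in a single index-scan grouping pass.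
import Mathlib
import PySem

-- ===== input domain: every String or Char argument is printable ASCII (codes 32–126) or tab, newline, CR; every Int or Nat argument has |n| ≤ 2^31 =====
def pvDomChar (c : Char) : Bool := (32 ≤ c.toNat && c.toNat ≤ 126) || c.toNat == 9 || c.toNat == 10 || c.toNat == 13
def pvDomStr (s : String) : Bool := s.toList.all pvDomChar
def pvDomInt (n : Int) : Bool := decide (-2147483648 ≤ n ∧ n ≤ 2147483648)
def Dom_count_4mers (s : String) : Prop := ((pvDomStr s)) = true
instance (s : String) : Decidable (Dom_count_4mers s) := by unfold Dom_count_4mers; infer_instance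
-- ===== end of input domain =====

-- B replaces A's hash-map counting + separate key sort by sorting the list of 4-mer slices
-- once and emitting the length of each maximal run of equal neighbours (alternative
-- algorithm); the return values are proved equal on all inputs.


-- ===== PORT A =====
def count_4mers (s : String) : List Int :=
  let k : Int := 4
  -- for i in range(len(s) - k + 1): kmer = s[i:i+k]; kmer_counts[kmer] += 1
  let kmer_counts : PySem.Dict String Int :=
    (PySem.List.pyRange 0 ((PySem.Str.len s : Int) - k + 1) 1).foldl
      (fun d i =>
        let kmer := PySem.Str.slice s (some i) (some (i + k))
        d.insert kmer (d.getD kmer 0 + 1))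
      PySem.Dict.empty
  -- [kmer_counts[kmer] for kmer in sorted(kmer_counts.keys())]
  (PySem.List.sorted kmer_counts.keys (fun x => x) false).map (fun kmer => kmer_counts.getD kmer 0)

-- ===== PORT B =====
-- the while loops of Source B, on the suffix kmers[i:] they scan: the inner while advances j
-- over the block equal to kmers[i], so j - i = 1 + length of the leading equal block of the
-- tail (takeWhile), and the next suffix kmers[j:] is the dropWhile remainder
def pvRunLens (kmers : List String) : List Int :=
  match kmers with
  | [] => []
  | x :: t =>
      ((1 + (t.takeWhile (fun y => y == x)).length : Nat) : Int)
        :: pvRunLens (t.dropWhile (fun y => y == x))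
termination_by kmers.length
decreasing_by simp; exact List.length_dropWhile_le _ _

def count_4mers_alt (s : String) : List Int :=
  -- kmers = sorted(s[i:i+4] for i in range(len(s) - 3))
  let kmers := PySem.List.sorted
    ((PySem.List.pyRange 0 ((PySem.Str.len s : Int) - 3) 1).map
      (fun i => PySem.Str.slice s (some i) (some (i + 4))))
    (fun x => x) false
  pvRunLens kmers

-- ===== PRECONDITION & SPEC =====
def Spec_count_4mers (s : String) (out : List Int) : Prop := out = count_4mers_alt s
instance (s : String) (out : List Int) : Decidable (Spec_count_4mers s out) := by unfold Spec_count_4mers; infer_instance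

-- ===== CLAIM (what is proved, stated in full; the proofs are below) =====
def Claim_equal_count_4mers : Prop := ∀ (s : String), Dom_count_4mers s → Spec_count_4mers s (count_4mers s)

-- ===== LEMMAS AND PROOFS =====

-- the distinct elements of a list, first occurrence of each run: mirror of pvRunLens keeping the key
def pvHeads (l : List String) : List String :=
  match l with
  | [] => []
  | x :: t => x :: pvHeads (t.dropWhile (fun y => y == x))
termination_by l.length
decreasing_by simp; exact List.length_dropWhile_le _ _

theorem mem_pvHeads (l : List String) (y : String) : y ∈ pvHeads l ↔ y ∈ l := by
  induction l using pvHeads.induct with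
  | case1 => simp [pvHeads]
  | case2 x t ih =>
    rw [pvHeads]
    simp only [List.mem_cons, ih]
    constructor
    · rintro (rfl | h)
      · exact Or.inl rfl
      · exact Or.inr ((List.dropWhile_sublist _).mem h)
    · rintro (rfl | h)
      · exact Or.inl rfl
      · rcases (List.mem_append.mp ((List.takeWhile_append_dropWhile (p := fun y => y == x) (l := t)) ▸ h)) with h' | h'
        · exact Or.inl (by simpa using List.mem_takeWhile_imp h')
        · exact Or.inr h'

theorem not_mem_dropWhile_of_sorted (x : String) (t : List String)
    (hs : (x :: t).Pairwise (· ≤ ·)) : x ∉ t.dropWhile (fun y => y == x) := by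
  intro hmem
  rcases List.pairwise_cons.mp hs with ⟨hx, ht⟩
  have hd : (t.dropWhile (fun y => y == x)).Pairwise (· ≤ ·) :=
    ht.sublist (List.dropWhile_sublist _)
  cases hr : t.dropWhile (fun y => y == x) with
  | nil => rw [hr] at hmem; exact (List.not_mem_nil).elim hmem
  | cons h r' =>
    have hhx : ¬ (h == x) = true := by
      have := List.head_dropWhile_not (p := fun y => y == x) (l := t) (by simp [hr])
      simpa [hr] using this
    have hne : h ≠ x := by simpa using hhx
    rw [hr] at hmem
    rcases List.mem_cons.mp hmem with rfl | hmem'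
    · exact hne rfl
    · rw [hr] at hd
      have h1 : h ≤ x := (List.pairwise_cons.mp hd).1 x hmem'
      have h2 : x ≤ h := hx h ((List.dropWhile_sublist _).mem (hr ▸ List.mem_cons_self))
      exact hne (le_antisymm h1 h2)

theorem pairwise_lt_pvHeads (l : List String) (hs : l.Pairwise (· ≤ ·)) :
    (pvHeads l).Pairwise (· < ·) := by
  induction l using pvHeads.induct with
  | case1 => simp [pvHeads]
  | case2 x t ih =>
    rcases List.pairwise_cons.mp hs with ⟨hx, ht⟩
    have hd : (t.dropWhile (fun y => y == x)).Pairwise (· ≤ ·) :=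
      ht.sublist (List.dropWhile_sublist _)
    rw [pvHeads]
    refine List.pairwise_cons.mpr ⟨?_, ih hd⟩
    intro y hy
    have hyr : y ∈ t.dropWhile (fun y => y == x) := (mem_pvHeads _ _).mp hy
    have hle : x ≤ y := hx y ((List.dropWhile_sublist _).mem hyr)
    have hne : x ≠ y := fun h => not_mem_dropWhile_of_sorted x t hs (h ▸ hyr)
    exact lt_of_le_of_ne hle hne

-- on a sorted list the run lengths are exactly the counts of the distinct elements, in order
theorem pvRunLens_eq_map_count (l : List String) (hs : l.Pairwise (· ≤ ·)) :
    pvRunLens l = (pvHeads l).map (fun k => (l.count k : Int)) := by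
  induction l using pvHeads.induct with
  | case1 => simp [pvRunLens, pvHeads]
  | case2 x t ih =>
    rcases List.pairwise_cons.mp hs with ⟨hx, ht⟩
    have hd : (t.dropWhile (fun y => y == x)).Pairwise (· ≤ ·) :=
      ht.sublist (List.dropWhile_sublist _)
    rw [pvRunLens, pvHeads, List.map_cons, ih hd]
    have htw : ∀ y ∈ t.takeWhile (fun y => y == x), y = x := by
      intro y hy; simpa using List.mem_takeWhile_imp hy
    refine congrArg₂ List.cons ?_ ?_
    · -- head: 1 + takeWhile length = count x (x :: t)
      have hct : t.count x = (t.takeWhile (fun y => y == x)).length := by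
        conv_lhs => rw [← List.takeWhile_append_dropWhile (p := fun y => y == x) (l := t)]
        rw [List.count_append]
        have h1 : (t.takeWhile (fun y => y == x)).count x
            = (t.takeWhile (fun y => y == x)).length :=
          List.count_eq_length.mpr (by intro b hb; simpa using (htw b hb).symm)
        have h2 : (t.dropWhile (fun y => y == x)).count x = 0 :=
          List.count_eq_zero.mpr (not_mem_dropWhile_of_sorted x t hs)
        omega
      simp [List.count_cons_self, hct]; omega
    · -- tail: counts in the drop part equal counts in x :: t
      apply List.map_congr_left
      intro k hk
      have hkr : k ∈ t.dropWhile (fun y => y == x) := (mem_pvHeads _ _).mp hk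
      have hkx : k ≠ x := fun h => not_mem_dropWhile_of_sorted x t hs (h ▸ hkr)
      congr 1
      conv_rhs => rw [List.count_cons, ← List.takeWhile_append_dropWhile (p := fun y => y == x) (l := t), List.count_append]
      have h1 : (t.takeWhile (fun y => y == x)).count k = 0 :=
        List.count_eq_zero.mpr (fun hm => hkx (htw k hm))
      simp [h1]
      exact fun h => hkx h.symm

-- main bridge: counts of the sorted distinct elements = run lengths of the sorted list
theorem pv_main (ks : List String) :
    (PySem.List.sorted (PySem.Set.ofList ks) (fun x => x) false).map (fun k => (ks.count k : Int))
      = pvRunLens (PySem.List.sorted ks (fun x => x) false) := by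
  set ys := PySem.List.sorted ks (fun x => x) false with hys
  have hsor : ys.Pairwise (· ≤ ·) := by
    simpa using PySem.List.sorted_pairwise (xs := ks) (key := fun x => x)
  have hperm : ys.Perm ks := PySem.List.sorted_perm ks (fun x => x) false
  have hkey : PySem.List.sorted (PySem.Set.ofList ks) (fun x => x) false = pvHeads ys := by
    apply PySem.List.sorted_eq_of_perm_of_pairwise_lt
    · refine (List.perm_ext_iff_of_nodup ?_ ?_).mpr ?_
      · exact (pairwise_lt_pvHeads ys hsor).imp (fun h => ne_of_lt h)
      · exact PySem.Set.nodup_ofList ks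
      · intro a
        rw [mem_pvHeads, PySem.Set.mem_ofList]
        exact hperm.mem_iff
    · simpa using pairwise_lt_pvHeads ys hsor
  rw [hkey, pvRunLens_eq_map_count ys hsor]
  apply List.map_congr_left
  intro k hk
  exact congrArg _ (hperm.count_eq k).symm

-- ===== VERDICT (by name: the statement is the Claim_ definition above) =====
theorem count_4mers_spec : Claim_equal_count_4mers := by
  intro s _
  show count_4mers s = count_4mers_alt s
  simp only [count_4mers, count_4mers_alt]
  have hfold : (PySem.List.pyRange 0 ((PySem.Str.len s : Int) - 4 + 1) 1).foldl
      (fun (d : PySem.Dict String Int) i =>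
        d.insert (PySem.Str.slice s (some i) (some (i + 4)))
          (d.getD (PySem.Str.slice s (some i) (some (i + 4))) 0 + 1))
      PySem.Dict.empty
      = PySem.Dict.counter ((PySem.List.pyRange 0 ((PySem.Str.len s : Int) - 4 + 1) 1).map
          (fun i => PySem.Str.slice s (some i) (some (i + 4)))) := by
    rw [← PySem.Dict.foldl_insert_getD_add_one_eq_counter]
    exact (List.foldl_map (f := fun i => PySem.Str.slice s (some i) (some (i + 4)))
      (g := fun (d : PySem.Dict String Int) x => d.insert x (d.getD x 0 + 1))).symm
  rw [hfold, PySem.Dict.keys_counter]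
  simp only [PySem.Dict.getD_counter]
  rw [show ((PySem.Str.len s : Int) - 4 + 1) = ((PySem.Str.len s : Int) - 3) from by ring]
  exact pv_main _
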